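-- pv_equiv track=rewrite | github.com/Fadi-AbuAlEtham/veriscope_ml_three | veriscope_training/src/veriscope_training/splits/splitters.py | _label_counts
-- ===== SOURCE A (Python) =====
-- from typing import Any
--
-- def _label_counts(records: list[dict[str, Any]], indices: list[int]) -> dict[str, int]:
--     counts = {"phishing": 0, "benign": 0, "null": 0}
--     for index in indices:
--         label = records[index].get("normalized_label")
--         if label == 1:
--             counts["phishing"] += 1
--         elif label == 0:
--             counts["benign"] += 1
--         else:
--             counts["null"] += 1
--     return counts
-- ===== SOURCE B (Python) =====
-- from typing import Any
--
-- def _label_counts(records: list[dict[str, Any]], indices: list[int]) -> dict[str, int]: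
--     phishing = sum(1 for i in indices if records[i].get("normalized_label") == 1)
--     benign = sum(1 for i in indices if records[i].get("normalized_label") == 0)
--     return {"phishing": phishing, "benign": benign, "null": len(indices) - phishing - benign}
-- ===== Notes on version B (the rewrite author's own statement) =====
-- stated objective: alternative
-- what changed: Replaces the single branching loop over a mutable counts dict with two independent sum() comprehensions (phishing and benign) and computes null arithmetically as len(indices) minus the other two, building the result dict once at the end.
import Mathlib
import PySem

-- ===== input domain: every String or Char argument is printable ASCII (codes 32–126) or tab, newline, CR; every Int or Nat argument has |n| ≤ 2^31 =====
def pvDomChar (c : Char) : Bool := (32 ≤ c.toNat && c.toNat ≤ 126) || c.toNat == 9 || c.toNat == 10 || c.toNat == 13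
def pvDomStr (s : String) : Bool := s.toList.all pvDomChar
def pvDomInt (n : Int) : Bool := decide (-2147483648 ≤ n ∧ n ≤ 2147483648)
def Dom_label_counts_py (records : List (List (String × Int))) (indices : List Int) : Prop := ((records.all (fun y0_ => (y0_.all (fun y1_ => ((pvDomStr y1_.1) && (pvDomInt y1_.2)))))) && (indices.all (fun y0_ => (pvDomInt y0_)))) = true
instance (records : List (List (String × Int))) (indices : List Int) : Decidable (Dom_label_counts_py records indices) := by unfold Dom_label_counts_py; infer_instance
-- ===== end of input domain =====

-- B (alternative): two independent 0/1-sums over the indices plus an arithmetic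
-- complement for "null", instead of A's single branching loop over a mutable dict.

-- ===== PORT A =====
-- records[index].get("normalized_label"): first-match lookup in the record's assoc list
def label_counts_py (records : List (List (String × Int))) (indices : List Int) : List (String × Int) :=
  (indices.foldl (fun counts index =>
      let label := (PySem.Dict.mk (PySem.List.pyGetD records index [])).get? "normalized_label"
      if label = some 1 then counts.modify "phishing" 0 (· + 1)
      else if label = some 0 then counts.modify "benign" 0 (· + 1)
      else counts.modify "null" 0 (· + 1))
    (PySem.Dict.mk [("phishing", (0 : Int)), ("benign", 0), ("null", 0)])).items

-- ===== PORT B =====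
def label_counts_py_alt (records : List (List (String × Int))) (indices : List Int) : List (String × Int) :=
  let phishing := (indices.map (fun i =>
      if (PySem.Dict.mk (PySem.List.pyGetD records i [])).get? "normalized_label" = some 1 then (1 : Int) else 0)).sum
  let benign := (indices.map (fun i =>
      if (PySem.Dict.mk (PySem.List.pyGetD records i [])).get? "normalized_label" = some 0 then (1 : Int) else 0)).sum
  [("phishing", phishing), ("benign", benign), ("null", (indices.length : Int) - phishing - benign)]

-- ===== PRECONDITION & SPEC =====
-- A raises IndexError on any index outside [-len(records), len(records)); exactly those inputs are excluded.
def Pre_label_counts_py (records : List (List (String × Int))) (indices : List Int) : Prop :=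
  ∀ i ∈ indices, PySem.Raise.InRange records.length i
instance (records : List (List (String × Int))) (indices : List Int) : Decidable (Pre_label_counts_py records indices) := by unfold Pre_label_counts_py; infer_instance
def pvWitness_label_counts_py : (List (List (String × Int))) × List Int :=
  ([[("normalized_label", 1)], [("normalized_label", 0)], []], [0, 1, 2, -1])

def Spec_label_counts_py (records : List (List (String × Int))) (indices : List Int) (out : List (String × Int)) : Prop := out = label_counts_py_alt records indices
instance (records : List (List (String × Int))) (indices : List Int) (out : List (String × Int)) : Decidable (Spec_label_counts_py records indices out) := by unfold Spec_label_counts_py; infer_instance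

-- ===== CLAIM (what is proved, stated in full; the proofs are below) =====
def Claim_equal_label_counts_py : Prop := ∀ (records : List (List (String × Int))) (indices : List Int), Dom_label_counts_py records indices → Pre_label_counts_py records indices → Spec_label_counts_py records indices (label_counts_py records indices)

-- ===== LEMMAS AND PROOFS =====

lemma modP (p b n : Int) :
    (PySem.Dict.mk [("phishing", p), ("benign", b), ("null", n)]).modify "phishing" 0 (· + 1)
    = PySem.Dict.mk [("phishing", p + 1), ("benign", b), ("null", n)] := by
  simp [PySem.Dict.modify, PySem.Dict.insert, PySem.Dict.getD, PySem.Dict.get?, PySem.Dict.contains]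

lemma modB (p b n : Int) :
    (PySem.Dict.mk [("phishing", p), ("benign", b), ("null", n)]).modify "benign" 0 (· + 1)
    = PySem.Dict.mk [("phishing", p), ("benign", b + 1), ("null", n)] := by
  simp [PySem.Dict.modify, PySem.Dict.insert, PySem.Dict.getD, PySem.Dict.get?, PySem.Dict.contains]

lemma modN (p b n : Int) :
    (PySem.Dict.mk [("phishing", p), ("benign", b), ("null", n)]).modify "null" 0 (· + 1)
    = PySem.Dict.mk [("phishing", p), ("benign", b), ("null", n + 1)] := by
  simp [PySem.Dict.modify, PySem.Dict.insert, PySem.Dict.getD, PySem.Dict.get?, PySem.Dict.contains]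

-- The dict state of A's loop stays the literal three-entry dict; the loop adds,
-- entrywise, B's two 0/1-sums and the complement count.
lemma label_counts_loop (records : List (List (String × Int))) (indices : List Int)
    (p b n : Int) :
    (indices.foldl (fun counts index =>
        let label := (PySem.Dict.mk (PySem.List.pyGetD records index [])).get? "normalized_label"
        if label = some 1 then counts.modify "phishing" 0 (· + 1)
        else if label = some 0 then counts.modify "benign" 0 (· + 1)
        else counts.modify "null" 0 (· + 1))
      (PySem.Dict.mk [("phishing", p), ("benign", b), ("null", n)])).items
    = [("phishing", p + (indices.map (fun i =>
          if (PySem.Dict.mk (PySem.List.pyGetD records i [])).get? "normalized_label" = some 1 then (1 : Int) else 0)).sum),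
       ("benign", b + (indices.map (fun i =>
          if (PySem.Dict.mk (PySem.List.pyGetD records i [])).get? "normalized_label" = some 0 then (1 : Int) else 0)).sum),
       ("null", n + ((indices.length : Int)
          - (indices.map (fun i =>
              if (PySem.Dict.mk (PySem.List.pyGetD records i [])).get? "normalized_label" = some 1 then (1 : Int) else 0)).sum
          - (indices.map (fun i =>
              if (PySem.Dict.mk (PySem.List.pyGetD records i [])).get? "normalized_label" = some 0 then (1 : Int) else 0)).sum))] := by
  induction indices generalizing p b n with
  | nil => simp
  | cons i rest ih =>
    simp only [List.foldl_cons, List.map_cons, List.sum_cons, List.length_cons]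
    by_cases h1 : (PySem.Dict.mk (PySem.List.pyGetD records i [])).get? "normalized_label" = some 1
    · have h0 : ¬ ((PySem.Dict.mk (PySem.List.pyGetD records i [])).get? "normalized_label" = some 0) := by
        rw [h1]; decide
      rw [if_pos h1, modP, ih, if_pos h1, if_neg h0]
      push_cast
      simp only [List.cons.injEq, Prod.mk.injEq, true_and, and_true]
      refine ⟨?_, ?_, ?_⟩ <;> ring
    · by_cases h2 : (PySem.Dict.mk (PySem.List.pyGetD records i [])).get? "normalized_label" = some 0
      · rw [if_neg h1, if_pos h2, modB, ih, if_neg h1, if_pos h2]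
        push_cast
        simp only [List.cons.injEq, Prod.mk.injEq, true_and, and_true]
        refine ⟨?_, ?_, ?_⟩ <;> ring
      · rw [if_neg h1, if_neg h2, modN, ih, if_neg h1, if_neg h2]
        push_cast
        simp only [List.cons.injEq, Prod.mk.injEq, true_and, and_true]
        refine ⟨?_, ?_, ?_⟩ <;> ring

-- ===== VERDICT (by name: the statement is the Claim_ definition above) =====
theorem label_counts_py_spec : Claim_equal_label_counts_py := by
  intro records indices _ _
  unfold Spec_label_counts_py label_counts_py label_counts_py_alt
  rw [label_counts_loop]
  norm_num
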